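-- pv_equiv track=rewrite | github.com/Jaffar17/Competitive-Programming-IBA-Fall-2022 | Class Problems/Kattis/IforAnEye.py | charConversion
-- ===== SOURCE A (Python) =====
-- def charConversion(word):
--     list1 = list(word)
--     list1Len = len(list1)
--     index = 0
--     while (index < list1Len - 1):
--         if (index < list1Len - 3 and word[index:index+4] in conversionRules["four char"]):
--             list1[index] = conversionRules["four char"][word[index:index+4]]
--             list1[index+1] = 'useless'
--             list1[index+2] = 'useless'
--             list1[index+3] = 'useless'
--             index += 4
--         elif (index < list1Len - 2 and word[index:index+3] in conversionRules["three char"]):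
--             list1[index] = conversionRules["three char"][word[index:index+3]]
--             list1[index+1] = 'useless'
--             list1[index+2] = 'useless'
--             index += 3
--         elif (word[index:index+2] in conversionRules["two char"]):
--             list1[index] = conversionRules["two char"][word[index:index+2]]
--             list1[index+1] = 'useless'
--             index += 2
--         else:
--             index += 1
--
--     return ''.join((c for c in list1 if c != 'useless'))
--
-- conversionRules = {
--     "two char": {
--         'at': '@',
--         'to': '2',
--         'be': 'b',
--         'oh': 'o',
--
--         'At': '@',
--         'To': '2',
--         'Be': 'B',
--         'Oh': 'O'
--     },
--     "three char": {
--         'and': '&',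
--         'one': '1',
--         'won': '1',
--         'too': '2',
--         'two': '2',
--         'for': '4',
--         'bea': 'b',
--         'bee': 'b',
--         'sea': 'c',
--         'see': 'c',
--         'eye': 'i',
--         'owe': 'o',
--         'are': 'r',
--         'you': 'u',
--         'why': 'y',
--
--         'And': '&',
--         'One': '1',
--         'Won': '1',
--         'Too': '2',
--         'Two': '2',
--         'For': '4',
--         'Bea': 'B',
--         'Bee': 'B',
--         'Sea': 'C',
--         'See': 'C',
--         'Eye': 'I',
--         'Owe': 'O',
--         'Are': 'R',
--         'You': 'U',
--         'Why': 'Y'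
--     },
--     "four char": {
--         'four': '4',
--
--         'Four': '4'
--     }
-- }
-- ===== SOURCE B (Python) =====
-- # Two staged passes over one merged rule dict: first tabulate, for every start
-- # position, the (replacement, chars-consumed) decision; then walk the jump chain
-- # from position 0 collecting the pieces.  No sentinel mutation, no filter pass.
-- _RULES = {
--     'four': '4', 'Four': '4',
--     'and': '&', 'one': '1', 'won': '1', 'too': '2', 'two': '2', 'for': '4',
--     'bea': 'b', 'bee': 'b', 'sea': 'c', 'see': 'c', 'eye': 'i', 'owe': 'o',
--     'are': 'r', 'you': 'u', 'why': 'y',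
--     'And': '&', 'One': '1', 'Won': '1', 'Too': '2', 'Two': '2', 'For': '4',
--     'Bea': 'B', 'Bee': 'B', 'Sea': 'C', 'See': 'C', 'Eye': 'I', 'Owe': 'O',
--     'Are': 'R', 'You': 'U', 'Why': 'Y',
--     'at': '@', 'to': '2', 'be': 'b', 'oh': 'o',
--     'At': '@', 'To': '2', 'Be': 'B', 'Oh': 'O',
-- }
--
--
-- def _ruleAt(word, n, i):
--     # the (replacement, length) decision at start position i, longest key first
--     if i + 4 <= n and word[i:i+4] in _RULES:
--         return (_RULES[word[i:i+4]], 4)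
--     if i + 3 <= n and word[i:i+3] in _RULES:
--         return (_RULES[word[i:i+3]], 3)
--     if i + 2 <= n and word[i:i+2] in _RULES:
--         return (_RULES[word[i:i+2]], 2)
--     return (word[i], 1)
--
--
-- def charConversion(word):
--     n = len(word)
--     rule = [('', 1)] * n
--     for i in range(n):
--         rule[i] = _ruleAt(word, n, i)
--     parts = []
--     i = 0
--     while i < n:
--         piece, step = rule[i]
--         parts.append(piece)
--         i += step
--     return ''.join(parts)
-- ===== Notes on version B (the rewrite author's own statement) =====
-- stated objective: alternative
-- what changed: B splits the job into two staged passes over one merged rule dict: it tabulates the (replacement, chars-consumed) decision at every start position, then walks the jump chain from position 0 collecting pieces, replacing A's single forward scan that overwrites consumed characters with a sentinel marker and then filters the sentinels out.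
import Mathlib
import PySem

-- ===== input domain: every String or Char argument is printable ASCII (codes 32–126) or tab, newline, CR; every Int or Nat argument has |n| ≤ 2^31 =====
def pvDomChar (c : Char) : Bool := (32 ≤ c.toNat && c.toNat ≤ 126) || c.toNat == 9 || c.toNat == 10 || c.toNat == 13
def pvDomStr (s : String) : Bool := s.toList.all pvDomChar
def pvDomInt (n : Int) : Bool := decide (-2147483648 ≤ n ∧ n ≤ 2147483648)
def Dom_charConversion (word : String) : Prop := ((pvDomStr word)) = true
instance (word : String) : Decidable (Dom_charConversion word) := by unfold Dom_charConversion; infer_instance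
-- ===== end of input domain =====

-- B stages the work: a per-position (replacement, chars-consumed) decision table over one merged
-- rule dict, then a jump-chain walk collecting the pieces — replacing A's forward scan that mutates
-- a char list with sentinel markers and filters them out (objective: alternative; no argument is mutated).

-- ===== PORT A =====
-- conversionRules["two char"] / ["three char"] / ["four char"] (module-level constant dicts)
def pvRules2 : PySem.Dict String String := PySem.Dict.ofList
  [("at","@"),("to","2"),("be","b"),("oh","o"),("At","@"),("To","2"),("Be","B"),("Oh","O")]
def pvRules3 : PySem.Dict String String := PySem.Dict.ofList
  [("and","&"),("one","1"),("won","1"),("too","2"),("two","2"),("for","4"),("bea","b"),("bee","b"),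
   ("sea","c"),("see","c"),("eye","i"),("owe","o"),("are","r"),("you","u"),("why","y"),
   ("And","&"),("One","1"),("Won","1"),("Too","2"),("Two","2"),("For","4"),("Bea","B"),("Bee","B"),
   ("Sea","C"),("See","C"),("Eye","I"),("Owe","O"),("Are","R"),("You","U"),("Why","Y")]
def pvRules4 : PySem.Dict String String := PySem.Dict.ofList [("four","4"),("Four","4")]

-- word[i:i+L] for a Nat index i: Python's clamped slice (exact: 0 ≤ i, cf. PySem.List.slice_natCast_add)
def pvSlice (w : List Char) (i L : Nat) : String := String.ofList ((w.drop i).take L)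

-- list(word) yields single-character strings
def pvSing (c : Char) : String := String.ofList [c]

-- the while loop of A; Nat comparisons `index < n - k` agree with Python's int comparisons
-- because index ≥ 0 and Python's n - k is negative exactly when Nat's n - k truncates to 0
def pvLoopA (w : List Char) (n : Nat) (list1 : List String) (index : Nat) : List String :=
  if h : index < n - 1 then
    if index < n - 3 ∧ ((pvRules4.get? (pvSlice w index 4)).isSome) then
      pvLoopA w n ((((list1.set index ((pvRules4.get? (pvSlice w index 4)).getD "")).set (index+1) "useless").set
        (index+2) "useless").set (index+3) "useless") (index+4)
    else if index < n - 2 ∧ ((pvRules3.get? (pvSlice w index 3)).isSome) then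
      pvLoopA w n (((list1.set index ((pvRules3.get? (pvSlice w index 3)).getD "")).set (index+1) "useless").set
        (index+2) "useless") (index+3)
    else if (pvRules2.get? (pvSlice w index 2)).isSome then
      pvLoopA w n ((list1.set index ((pvRules2.get? (pvSlice w index 2)).getD "")).set (index+1) "useless") (index+2)
    else
      pvLoopA w n list1 (index+1)
  else list1
termination_by n - index
decreasing_by
  all_goals exact Nat.sub_lt_sub_left (Nat.lt_of_lt_of_le h (Nat.sub_le n 1)) (Nat.lt_add_of_pos_right (by decide))

def charConversion (word : String) : String :=
  PySem.Str.join ""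
    ((pvLoopA word.toList word.toList.length (word.toList.map pvSing) 0).filter (fun c => c != "useless"))

-- ===== PORT B =====
-- _RULES, in Source B's insertion order: 4-char keys, then 3-char, then 2-char
def pvCombined : PySem.Dict String String := PySem.Dict.ofList
  [("four","4"),("Four","4"),
   ("and","&"),("one","1"),("won","1"),("too","2"),("two","2"),("for","4"),("bea","b"),("bee","b"),
   ("sea","c"),("see","c"),("eye","i"),("owe","o"),("are","r"),("you","u"),("why","y"),
   ("And","&"),("One","1"),("Won","1"),("Too","2"),("Two","2"),("For","4"),("Bea","B"),("Bee","B"),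
   ("Sea","C"),("See","C"),("Eye","I"),("Owe","O"),("Are","R"),("You","U"),("Why","Y"),
   ("at","@"),("to","2"),("be","b"),("oh","o"),("At","@"),("To","2"),("Be","B"),("Oh","O")]

-- _ruleAt(word, n, i): the (replacement, length) decision at start position i; Python's
-- word[i] (0 ≤ i < n) is the one-character string pvSlice w i 1, exact here
def pvRuleAt (w : List Char) (n i : Nat) : String × Nat :=
  if i + 4 ≤ n ∧ ((pvCombined.get? (pvSlice w i 4)).isSome) then
    (((pvCombined.get? (pvSlice w i 4)).getD ""), 4)
  else if i + 3 ≤ n ∧ ((pvCombined.get? (pvSlice w i 3)).isSome) then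
    (((pvCombined.get? (pvSlice w i 3)).getD ""), 3)
  else if i + 2 ≤ n ∧ ((pvCombined.get? (pvSlice w i 2)).isSome) then
    (((pvCombined.get? (pvSlice w i 2)).getD ""), 2)
  else
    (pvSlice w i 1, 1)

-- `for i in range(n): rule[i] = _ruleAt(word, n, i)` (the write rule[i] is in range: i < n = len(rule))
def pvLoopT (w : List Char) (n : Nat) (tab : List (String × Nat)) (i : Nat) : List (String × Nat) :=
  if _h : i < n then pvLoopT w n (tab.set i (pvRuleAt w n i)) (i + 1) else tab
termination_by n - i

-- the `while i < n` jump-chain walk appending pieces; ported with fuel n, enough because every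
-- stored step is ≥ 1 (the read rule[i] is in range, so Python's rule[i] is List.getD exactly)
def pvFollow (tab : List (String × Nat)) (n : Nat) : Nat → Nat → List String
  | 0, _ => []
  | Nat.succ fuel, i =>
    if i < n then (tab.getD i ("", 1)).1 :: pvFollow tab n fuel (i + (tab.getD i ("", 1)).2) else []

def charConversion_alt (word : String) : String :=
  PySem.Str.join ""
    (pvFollow (pvLoopT word.toList word.toList.length
        (List.replicate word.toList.length ("", 1)) 0)
      word.toList.length word.toList.length 0)

-- ===== PRECONDITION & SPEC =====
def Spec_charConversion (word : String) (out : String) : Prop := out = charConversion_alt word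
instance (word : String) (out : String) : Decidable (Spec_charConversion word out) := by unfold Spec_charConversion; infer_instance

-- ===== CLAIM (what is proved, stated in full; the proofs are below) =====
def Claim_equal_charConversion : Prop := ∀ (word : String), Dom_charConversion word → Spec_charConversion word (charConversion word)

-- ===== LEMMAS AND PROOFS =====

-- proof-only reference: the list of output pieces the greedy conversion emits for the suffix
-- starting at i (both programs are reduced to it)
def pvGref (w : List Char) (n i : Nat) : List String :=
  if _h : i < n then
    if i + 4 ≤ n ∧ ((pvCombined.get? (pvSlice w i 4)).isSome) then
      ((pvCombined.get? (pvSlice w i 4)).getD "") :: pvGref w n (i+4)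
    else if i + 3 ≤ n ∧ ((pvCombined.get? (pvSlice w i 3)).isSome) then
      ((pvCombined.get? (pvSlice w i 3)).getD "") :: pvGref w n (i+3)
    else if i + 2 ≤ n ∧ ((pvCombined.get? (pvSlice w i 2)).isSome) then
      ((pvCombined.get? (pvSlice w i 2)).getD "") :: pvGref w n (i+2)
    else
      pvSlice w i 1 :: pvGref w n (i+1)
  else []
termination_by n - i
decreasing_by
  all_goals exact Nat.sub_lt_sub_left _h (Nat.lt_add_of_pos_right (by decide))

-- get? on a literal dict whose leading block of keys cannot match s (wrong length) skips that block
lemma pvGetDropPrefix (ps qs : List (String × String)) (s : String)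
    (h : ∀ p ∈ ps, (p.1 == s) = false) :
    (PySem.Dict.mk (ps ++ qs)).get? s = (PySem.Dict.mk qs).get? s := by
  have hn : List.find? (fun p => p.1 == s) ps = none :=
    List.find?_eq_none.mpr (fun p hp => by simp [h p hp])
  simp [PySem.Dict.get?, List.find?_append, hn]

-- get? on a literal dict whose trailing block cannot match s returns the leading block's answer
lemma pvGetDropSuffix (ps qs : List (String × String)) (s : String)
    (h : ∀ p ∈ qs, (p.1 == s) = false) :
    (PySem.Dict.mk (ps ++ qs)).get? s = (PySem.Dict.mk ps).get? s := by
  have hn : List.find? (fun p => p.1 == s) qs = none :=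
    List.find?_eq_none.mpr (fun p hp => by simp [h p hp])
  simp [PySem.Dict.get?, List.find?_append, hn]

lemma pvKeyNe (t : String) (s : String) (h : t.toList.length ≠ s.toList.length) : (t == s) = false := by
  rw [beq_eq_false_iff_ne]; intro e; subst e; exact h rfl

-- a slice of exact length L is looked up in _RULES exactly as in A's length-L rule dict
set_option maxRecDepth 8192 in
lemma pvGet4 (s : String) (h : s.toList.length = 4) : pvCombined.get? s = pvRules4.get? s := by
  have e : pvCombined = PySem.Dict.mk ([("four","4"),("Four","4")] ++
    [("and","&"),("one","1"),("won","1"),("too","2"),("two","2"),("for","4"),("bea","b"),("bee","b"),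
     ("sea","c"),("see","c"),("eye","i"),("owe","o"),("are","r"),("you","u"),("why","y"),
     ("And","&"),("One","1"),("Won","1"),("Too","2"),("Two","2"),("For","4"),("Bea","B"),("Bee","B"),
     ("Sea","C"),("See","C"),("Eye","I"),("Owe","O"),("Are","R"),("You","U"),("Why","Y"),
     ("at","@"),("to","2"),("be","b"),("oh","o"),("At","@"),("To","2"),("Be","B"),("Oh","O")]) := by decide
  have e4 : pvRules4 = PySem.Dict.mk [("four","4"),("Four","4")] := by decide
  rw [e, e4, pvGetDropSuffix]
  intro p hp
  apply pvKeyNe; rw [h]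
  fin_cases hp <;> decide

set_option maxRecDepth 8192 in
lemma pvGet3 (s : String) (h : s.toList.length = 3) : pvCombined.get? s = pvRules3.get? s := by
  have e : pvCombined = PySem.Dict.mk ([("four","4"),("Four","4")] ++
    ([("and","&"),("one","1"),("won","1"),("too","2"),("two","2"),("for","4"),("bea","b"),("bee","b"),
     ("sea","c"),("see","c"),("eye","i"),("owe","o"),("are","r"),("you","u"),("why","y"),
     ("And","&"),("One","1"),("Won","1"),("Too","2"),("Two","2"),("For","4"),("Bea","B"),("Bee","B"),
     ("Sea","C"),("See","C"),("Eye","I"),("Owe","O"),("Are","R"),("You","U"),("Why","Y")] ++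
    [("at","@"),("to","2"),("be","b"),("oh","o"),("At","@"),("To","2"),("Be","B"),("Oh","O")])) := by decide
  have e3 : pvRules3 = PySem.Dict.mk
    [("and","&"),("one","1"),("won","1"),("too","2"),("two","2"),("for","4"),("bea","b"),("bee","b"),
     ("sea","c"),("see","c"),("eye","i"),("owe","o"),("are","r"),("you","u"),("why","y"),
     ("And","&"),("One","1"),("Won","1"),("Too","2"),("Two","2"),("For","4"),("Bea","B"),("Bee","B"),
     ("Sea","C"),("See","C"),("Eye","I"),("Owe","O"),("Are","R"),("You","U"),("Why","Y")] := by decide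
  rw [e, pvGetDropPrefix, pvGetDropSuffix, ← e3]
  · intro p hp; apply pvKeyNe; rw [h]; fin_cases hp <;> decide
  · intro p hp; apply pvKeyNe; rw [h]; fin_cases hp <;> decide

set_option maxRecDepth 8192 in
lemma pvGet2 (s : String) (h : s.toList.length = 2) : pvCombined.get? s = pvRules2.get? s := by
  have e : pvCombined = PySem.Dict.mk (
    ([("four","4"),("Four","4")] ++
    [("and","&"),("one","1"),("won","1"),("too","2"),("two","2"),("for","4"),("bea","b"),("bee","b"),
     ("sea","c"),("see","c"),("eye","i"),("owe","o"),("are","r"),("you","u"),("why","y"),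
     ("And","&"),("One","1"),("Won","1"),("Too","2"),("Two","2"),("For","4"),("Bea","B"),("Bee","B"),
     ("Sea","C"),("See","C"),("Eye","I"),("Owe","O"),("Are","R"),("You","U"),("Why","Y")]) ++
    [("at","@"),("to","2"),("be","b"),("oh","o"),("At","@"),("To","2"),("Be","B"),("Oh","O")]) := by decide
  have e2 : pvRules2 = PySem.Dict.mk
    [("at","@"),("to","2"),("be","b"),("oh","o"),("At","@"),("To","2"),("Be","B"),("Oh","O")] := by decide
  rw [e, pvGetDropPrefix, ← e2]
  intro p hp; apply pvKeyNe; rw [h]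
  simp only [List.mem_append] at hp
  rcases hp with hp | hp <;> fin_cases hp <;> decide

-- every value of the rule dicts is a single character, never the sentinel marker
lemma pvValNe (d : PySem.Dict String String) (s r : String)
    (hv : ∀ p ∈ d.items, p.2 ≠ "useless") (h : d.get? s = some r) : r ≠ "useless" := by
  simp only [PySem.Dict.get?, Option.map_eq_some_iff] at h
  obtain ⟨p, hp, rfl⟩ := h
  exact hv p (List.mem_of_find?_eq_some hp)

lemma pvSingNe (c : Char) : (pvSing c != "useless") = true := by
  simp only [pvSing, bne_iff_ne, ne_eq]
  intro h
  have := congrArg (fun s => s.toList.length) h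
  simp at this

lemma pvSliceLen (w : List Char) (i L : Nat) (h : i + L ≤ w.length) :
    (pvSlice w i L).toList.length = L := by
  simp [pvSlice, String.toList_ofList]
  omega

lemma pvSet4 (pre : List String) (a b c d r : String) (l : List String) :
    ((((pre ++ a :: b :: c :: d :: l).set pre.length r).set (pre.length + 1) "useless").set
        (pre.length + 2) "useless").set (pre.length + 3) "useless"
      = pre ++ r :: "useless" :: "useless" :: "useless" :: l := by
  have e1 : pre.length + 1 - pre.length = 1 := by omega
  have e2 : pre.length + 2 - pre.length = 2 := by omega
  have e3 : pre.length + 3 - pre.length = 3 := by omega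
  simp [e1, e2, e3]

lemma pvSet3 (pre : List String) (a b c r : String) (l : List String) :
    (((pre ++ a :: b :: c :: l).set pre.length r).set (pre.length + 1) "useless").set
        (pre.length + 2) "useless"
      = pre ++ r :: "useless" :: "useless" :: l := by
  have e1 : pre.length + 1 - pre.length = 1 := by omega
  have e2 : pre.length + 2 - pre.length = 2 := by omega
  simp [e1, e2]

lemma pvSet2 (pre : List String) (a b r : String) (l : List String) :
    ((pre ++ a :: b :: l).set pre.length r).set (pre.length + 1) "useless"
      = pre ++ r :: "useless" :: l := by
  have e1 : pre.length + 1 - pre.length = 1 := by omega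
  simp [e1]

lemma pvRules4_vals : ∀ p ∈ pvRules4.items, p.2 ≠ "useless" := by decide
set_option maxRecDepth 8192 in
lemma pvRules3_vals : ∀ p ∈ pvRules3.items, p.2 ≠ "useless" := by decide
lemma pvRules2_vals : ∀ p ∈ pvRules2.items, p.2 ≠ "useless" := by decide

-- A-side invariant: A's loop run on a buffer whose already-processed prefix is `done`
-- (and whose suffix is still the pristine single-character strings) produces, after the
-- final filter, `done` filtered followed by exactly the greedy pieces pvGref of the rest
set_option maxRecDepth 8192 in
lemma pvMain (w : List Char) :
    ∀ fuel index done, w.length - index ≤ fuel → done.length = index →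
    (pvLoopA w w.length (done ++ (w.drop index).map pvSing) index).filter (fun c => c != "useless")
      = done.filter (fun c => c != "useless") ++ pvGref w w.length index := by
  intro fuel
  induction fuel with
  | zero =>
    intro index done hf hd
    rw [pvLoopA]; conv_rhs => rw [pvGref]
    have h1 : ¬ index < w.length - 1 := by omega
    have h2 : ¬ index < w.length := by omega
    have hdrop : w.drop index = [] := List.drop_eq_nil_of_le (by omega)
    simp [h1, h2, hdrop]
  | succ fuel ih =>
    intro index done hf hd
    subst hd
    rw [pvLoopA]; conv_rhs => rw [pvGref]
    by_cases hend : done.length < w.length - 1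
    · simp only [dif_pos hend]
      have hin : done.length < w.length := by omega
      simp only [dif_pos hin]
      by_cases h4 : done.length < w.length - 3 ∧ (pvRules4.get? (pvSlice w done.length 4)).isSome
      · -- four-char branch on both sides
        have hi4 : done.length + 4 ≤ w.length := by omega
        have hlen : (pvSlice w done.length 4).toList.length = 4 := pvSliceLen _ _ _ hi4
        have hc : pvCombined.get? (pvSlice w done.length 4) = pvRules4.get? (pvSlice w done.length 4) :=
          pvGet4 _ hlen
        obtain ⟨rep, hrep⟩ := Option.isSome_iff_exists.mp h4.2
        have hrepne : (rep != "useless") = true :=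
          bne_iff_ne.mpr (pvValNe pvRules4 _ _ pvRules4_vals hrep)
        rw [if_pos h4, if_pos ⟨hi4, by rw [hc]; exact h4.2⟩]
        have hd0 : w.drop done.length = w[done.length] :: w.drop (done.length + 1) :=
          List.drop_eq_getElem_cons (by omega)
        have hd1 : w.drop (done.length + 1) = w[done.length + 1] :: w.drop (done.length + 2) :=
          List.drop_eq_getElem_cons (by omega)
        have hd2 : w.drop (done.length + 2) = w[done.length + 2] :: w.drop (done.length + 3) :=
          List.drop_eq_getElem_cons (by omega)
        have hd3 : w.drop (done.length + 3) = w[done.length + 3] :: w.drop (done.length + 4) :=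
          List.drop_eq_getElem_cons (by omega)
        rw [hd0, hd1, hd2, hd3, List.map_cons, List.map_cons, List.map_cons, List.map_cons,
          hrep, hc, hrep]
        simp only [Option.getD_some]
        rw [pvSet4]
        have : done ++ rep :: "useless" :: "useless" :: "useless" :: (w.drop (done.length + 4)).map pvSing
            = (done ++ [rep, "useless", "useless", "useless"]) ++ (w.drop (done.length + 4)).map pvSing := by
          simp
        rw [this, ih (done.length + 4) (done ++ [rep, "useless", "useless", "useless"]) (by omega) (by simp)]
        simp [List.filter_append, hrepne]
      · -- A's four-char test fails: so does pvGref's (same slice, merged table ≡ the 4-char table)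
        rw [if_neg h4]
        have hn4 : ¬ (done.length + 4 ≤ w.length ∧ (pvCombined.get? (pvSlice w done.length 4)).isSome) := by
          rintro ⟨ha, hs⟩
          exact h4 ⟨by omega, by rw [← pvGet4 _ (pvSliceLen _ _ _ ha)]; exact hs⟩
        rw [if_neg hn4]
        by_cases h3 : done.length < w.length - 2 ∧ (pvRules3.get? (pvSlice w done.length 3)).isSome
        · have hi3 : done.length + 3 ≤ w.length := by omega
          have hlen : (pvSlice w done.length 3).toList.length = 3 := pvSliceLen _ _ _ hi3
          have hc : pvCombined.get? (pvSlice w done.length 3) = pvRules3.get? (pvSlice w done.length 3) :=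
            pvGet3 _ hlen
          obtain ⟨rep, hrep⟩ := Option.isSome_iff_exists.mp h3.2
          have hrepne : (rep != "useless") = true :=
            bne_iff_ne.mpr (pvValNe pvRules3 _ _ pvRules3_vals hrep)
          rw [if_pos h3, if_pos ⟨hi3, by rw [hc]; exact h3.2⟩]
          have hd0 : w.drop done.length = w[done.length] :: w.drop (done.length + 1) :=
            List.drop_eq_getElem_cons (by omega)
          have hd1 : w.drop (done.length + 1) = w[done.length + 1] :: w.drop (done.length + 2) :=
            List.drop_eq_getElem_cons (by omega)
          have hd2 : w.drop (done.length + 2) = w[done.length + 2] :: w.drop (done.length + 3) :=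
            List.drop_eq_getElem_cons (by omega)
          rw [hd0, hd1, hd2, List.map_cons, List.map_cons, List.map_cons, hrep, hc, hrep]
          simp only [Option.getD_some]
          rw [pvSet3]
          have : done ++ rep :: "useless" :: "useless" :: (w.drop (done.length + 3)).map pvSing
              = (done ++ [rep, "useless", "useless"]) ++ (w.drop (done.length + 3)).map pvSing := by
            simp
          rw [this, ih (done.length + 3) (done ++ [rep, "useless", "useless"]) (by omega) (by simp)]
          simp [List.filter_append, hrepne]
        · rw [if_neg h3]
          have hn3 : ¬ (done.length + 3 ≤ w.length ∧ (pvCombined.get? (pvSlice w done.length 3)).isSome) := by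
            rintro ⟨ha, hs⟩
            exact h3 ⟨by omega, by rw [← pvGet3 _ (pvSliceLen _ _ _ ha)]; exact hs⟩
          rw [if_neg hn3]
          have hi2 : done.length + 2 ≤ w.length := by omega
          have hlen : (pvSlice w done.length 2).toList.length = 2 := pvSliceLen _ _ _ hi2
          have hc : pvCombined.get? (pvSlice w done.length 2) = pvRules2.get? (pvSlice w done.length 2) :=
            pvGet2 _ hlen
          by_cases h2 : (pvRules2.get? (pvSlice w done.length 2)).isSome
          · obtain ⟨rep, hrep⟩ := Option.isSome_iff_exists.mp h2
            have hrepne : (rep != "useless") = true :=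
              bne_iff_ne.mpr (pvValNe pvRules2 _ _ pvRules2_vals hrep)
            rw [if_pos h2, if_pos ⟨hi2, by rw [hc]; exact h2⟩]
            have hd0 : w.drop done.length = w[done.length] :: w.drop (done.length + 1) :=
              List.drop_eq_getElem_cons (by omega)
            have hd1 : w.drop (done.length + 1) = w[done.length + 1] :: w.drop (done.length + 2) :=
              List.drop_eq_getElem_cons (by omega)
            rw [hd0, hd1, List.map_cons, List.map_cons, hrep, hc, hrep]
            simp only [Option.getD_some]
            rw [pvSet2]
            have : done ++ rep :: "useless" :: (w.drop (done.length + 2)).map pvSing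
                = (done ++ [rep, "useless"]) ++ (w.drop (done.length + 2)).map pvSing := by
              simp
            rw [this, ih (done.length + 2) (done ++ [rep, "useless"]) (by omega) (by simp)]
            simp [List.filter_append, hrepne]
          · -- no rule fires: A advances by one, pvGref emits the single character
            rw [if_neg h2]
            have hn2 : ¬ (done.length + 2 ≤ w.length ∧ (pvCombined.get? (pvSlice w done.length 2)).isSome) := by
              rintro ⟨_, hs⟩
              exact h2 (by rw [← hc]; exact hs)
            rw [if_neg hn2]
            have hd0 : w.drop done.length = w[done.length] :: w.drop (done.length + 1) :=
              List.drop_eq_getElem_cons (by omega)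
            have hsl : pvSlice w done.length 1 = pvSing w[done.length] := by
              rw [pvSlice, pvSing, hd0, List.take_succ_cons, List.take_zero]
            conv_lhs => rw [hd0, List.map_cons]
            have : done ++ pvSing w[done.length] :: (w.drop (done.length + 1)).map pvSing
                = (done ++ [pvSing w[done.length]]) ++ (w.drop (done.length + 1)).map pvSing := by
              simp
            rw [this, ih (done.length + 1) (done ++ [pvSing w[done.length]]) (by omega) (by simp)]
            rw [hsl]
            simp [List.filter_append, pvSingNe]
    · -- A's loop is over: at most one pristine character remains
      simp only [dif_neg hend]
      by_cases hin : done.length < w.length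
      · -- exactly one character left: pvGref emits it and stops
        have hone : w.length = done.length + 1 := by omega
        simp only [dif_pos hin]
        have hn4 : ¬ (done.length + 4 ≤ w.length ∧ (pvCombined.get? (pvSlice w done.length 4)).isSome) := by
          rintro ⟨ha, _⟩; omega
        have hn3 : ¬ (done.length + 3 ≤ w.length ∧ (pvCombined.get? (pvSlice w done.length 3)).isSome) := by
          rintro ⟨ha, _⟩; omega
        have hn2 : ¬ (done.length + 2 ≤ w.length ∧ (pvCombined.get? (pvSlice w done.length 2)).isSome) := by
          rintro ⟨ha, _⟩; omega
        rw [if_neg hn4, if_neg hn3, if_neg hn2]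
        conv_rhs => rw [pvGref]
        have hstop : ¬ done.length + 1 < w.length := by omega
        simp only [dif_neg hstop]
        have hd0 : w.drop done.length = w[done.length] :: w.drop (done.length + 1) :=
          List.drop_eq_getElem_cons (by omega)
        have hdrop : w.drop (done.length + 1) = [] := List.drop_eq_nil_of_le (by omega)
        have hsl : pvSlice w done.length 1 = pvSing w[done.length] := by
          rw [pvSlice, pvSing, hd0, List.take_succ_cons, List.take_zero]
        rw [hd0, hdrop, hsl]
        simp [List.filter_append, pvSingNe]
      · have hdrop : w.drop done.length = [] := List.drop_eq_nil_of_le (by omega)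
        simp [dif_neg hin, hdrop]

-- getD through List.set
lemma pvGetDSet_self {a : Type} (l : List a) (k : Nat) (v d : a) (h : k < l.length) :
    (l.set k v).getD k d = v := by
  simp [List.getD, h]

lemma pvGetDSet_ne {a : Type} (l : List a) (k m : Nat) (v d : a) (h : m ≠ k) :
    (l.set k v).getD m d = l.getD m d := by
  simp [List.getD, h.symm]

-- the table-filling loop never touches entries below its index
lemma pvLoopT_pres (w : List Char) (n : Nat) (d : String × Nat) :
    ∀ fuel i tab, n - i ≤ fuel → ∀ m, m < i → (pvLoopT w n tab i).getD m d = tab.getD m d := by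
  intro fuel
  induction fuel with
  | zero =>
    intro i tab hf m hm
    rw [pvLoopT]; simp [show ¬ i < n by omega]
  | succ fuel ih =>
    intro i tab hf m hm
    rw [pvLoopT]
    split_ifs with h
    · rw [ih (i + 1) _ (by omega) m (by omega), pvGetDSet_ne _ _ _ _ _ (by omega)]
    · rfl

-- table invariant: after filling from index i on, every entry i ≤ m < n holds _ruleAt m
lemma pvLoopT_getD (w : List Char) (n : Nat) (d : String × Nat) :
    ∀ fuel i tab, n - i ≤ fuel → tab.length = n →
    ∀ m, i ≤ m → m < n → (pvLoopT w n tab i).getD m d = pvRuleAt w n m := by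
  intro fuel
  induction fuel with
  | zero =>
    intro i tab hf _ m him hm
    omega
  | succ fuel ih =>
    intro i tab hf hlen m him hm
    rw [pvLoopT]
    rw [dif_pos (by omega)]
    by_cases hmi : m = i
    · subst hmi
      rw [pvLoopT_pres w n d (n - (m + 1)) (m + 1) _ (le_refl _) m (by omega),
        pvGetDSet_self _ _ _ _ (by omega)]
    · exact ih (i + 1) _ (by omega) (by simp [hlen]) m (by omega) hm

-- the jump-chain walk over a correct table produces exactly the greedy pieces pvGref;
-- fuel n - i suffices because every step is ≥ 1
lemma pvFollow_eq (w : List Char) (n : Nat) (tab : List (String × Nat))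
    (htab : ∀ m, m < n → tab.getD m ("", 1) = pvRuleAt w n m) :
    ∀ fuel i, n - i ≤ fuel → pvFollow tab n fuel i = pvGref w n i := by
  intro fuel
  induction fuel with
  | zero =>
    intro i hf
    rw [pvGref]
    simp [pvFollow, show ¬ i < n by omega]
  | succ fuel ih =>
    intro i hf
    by_cases h : i < n
    · rw [pvGref]
      simp only [pvFollow, if_pos h, dif_pos h, htab i h, pvRuleAt]
      split_ifs with c4 c3 c2 <;> dsimp only <;> rw [ih _ (by omega)]
    · rw [pvGref]
      simp only [pvFollow, if_neg h, dif_neg h]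

-- ===== VERDICT (by name: the statement is the Claim_ definition above) =====
theorem charConversion_spec : Claim_equal_charConversion := by
  intro word _
  unfold Spec_charConversion charConversion charConversion_alt
  have hA := pvMain word.toList (word.toList.length) 0 [] (by omega) rfl
  simp only [List.drop_zero, List.nil_append, List.filter_nil] at hA
  rw [hA]
  have hB := pvFollow_eq word.toList word.toList.length
    (pvLoopT word.toList word.toList.length (List.replicate word.toList.length ("", 1)) 0)
    (fun m hm => pvLoopT_getD word.toList word.toList.length ("", 1)
      word.toList.length 0 _ (by omega) (by simp) m (Nat.zero_le _) hm)
    word.toList.length 0 (by omega)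
  rw [hB]
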